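-- pv_equiv track=rewrite | github.com/louisabraham/penta.py | penta.py | all_shifts
-- ===== SOURCE A (Python) =====
-- def bounds(shape):
--     return (
--         max(x for x, _, _ in shape) + 1,
--         max(y for _, y, _ in shape) + 1,
--         max(z for _, _, z in shape) + 1,
--     )
--
-- def all_shifts(shape, tile):
--     """return all shifts of tile that fit in shape"""
--     ans = []
--     dims = bounds(shape)
--     for dx in range(dims[0]):
--         for dy in range(dims[1]):
--             for dz in range(dims[2]):
--                 t = [(x + dx, y + dy, z + dz) for x, y, z in tile]
--                 if shape.issuperset(t):
--                     ans.append(t)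
--     return ans
-- ===== SOURCE B (Python) =====
-- def bounds(shape):
--     return (
--         max(x for x, _, _ in shape) + 1,
--         max(y for _, y, _ in shape) + 1,
--         max(z for _, _, z in shape) + 1,
--     )
--
-- def all_shifts(shape, tile):
--     """return all shifts of tile that fit in shape
--
--     Anchor tile[0] on each cell of shape: only |shape| candidate shifts
--     instead of the whole bounding box; validate each, then sort into the
--     lexicographic (dx, dy, dz) order."""
--     d0, d1, d2 = bounds(shape)
--     x0, y0, z0 = tile[0]
--     cells = set(shape)
--     shifts = []
--     for sx, sy, sz in shape:
--         dx, dy, dz = sx - x0, sy - y0, sz - z0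
--         if (0 <= dx < d0 and 0 <= dy < d1 and 0 <= dz < d2
--                 and all((x + dx, y + dy, z + dz) in cells for x, y, z in tile)):
--             shifts.append((dx, dy, dz))
--     # components lie in [0, 2**33), so this packed integer key is exactly
--     # the lexicographic order on the triples
--     shifts.sort(key=lambda d: d[0] * (1 << 66) + d[1] * (1 << 33) + d[2])
--     return [[(x + dx, y + dy, z + dz) for x, y, z in tile]
--             for dx, dy, dz in shifts]
-- ===== Notes on version B (the rewrite author's own statement) =====
-- stated objective: faster
-- what changed: Instead of scanning every (dx,dy,dz) in the shape's bounding box, B anchors tile[0] on each shape cell to get only |shape| candidate shifts, validates each, and sorts them into the lexicographic order A's triple loop produces.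
-- outside the precondition, e.g. on all_shifts({(0, 0, 0)}, []): A returns [[]], B raises IndexError
import Mathlib
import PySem

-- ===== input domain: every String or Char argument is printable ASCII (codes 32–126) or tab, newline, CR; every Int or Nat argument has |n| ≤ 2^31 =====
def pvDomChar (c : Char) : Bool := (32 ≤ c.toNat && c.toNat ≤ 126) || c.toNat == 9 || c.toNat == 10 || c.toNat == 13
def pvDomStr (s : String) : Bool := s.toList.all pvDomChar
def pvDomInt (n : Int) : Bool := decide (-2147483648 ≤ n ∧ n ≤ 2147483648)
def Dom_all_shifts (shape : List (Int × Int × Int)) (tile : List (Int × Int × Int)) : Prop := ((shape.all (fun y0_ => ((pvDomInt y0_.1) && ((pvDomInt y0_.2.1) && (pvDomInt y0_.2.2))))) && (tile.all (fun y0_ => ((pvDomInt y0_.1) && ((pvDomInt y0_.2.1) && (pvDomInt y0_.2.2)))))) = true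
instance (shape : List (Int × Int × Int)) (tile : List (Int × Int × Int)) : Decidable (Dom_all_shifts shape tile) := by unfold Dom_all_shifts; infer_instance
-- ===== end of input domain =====

-- B anchors tile[0] on each shape cell (|shape| candidate shifts) instead of scanning
-- the whole bounding box, then sorts the valid shifts into A's lexicographic order:
-- an asymptotically smaller search space.

-- ===== PORT A =====
-- helper `bounds`: the three Python `max(...)` calls raise ValueError on an empty
-- shape, hence the Option (none = ValueError); used by both Pythons.
def pvBounds? (shape : List (Int × Int × Int)) : Option (Int × Int × Int) :=
  match PySem.List.max? (shape.map (fun p => p.1)) (fun v => v),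
        PySem.List.max? (shape.map (fun p => p.2.1)) (fun v => v),
        PySem.List.max? (shape.map (fun p => p.2.2)) (fun v => v) with
  | some a, some b, some c => some (a + 1, b + 1, c + 1)
  | _, _, _ => none

def all_shifts (shape : List (Int × Int × Int)) (tile : List (Int × Int × Int)) : List (List (Int × Int × Int)) :=
  match pvBounds? shape with
  | none => []   -- Python raises ValueError here; excluded by Pre_
  | some (d0, d1, d2) =>
    (PySem.List.pyRange 0 d0 1).foldl (fun ans dx =>
      (PySem.List.pyRange 0 d1 1).foldl (fun ans dy =>
        (PySem.List.pyRange 0 d2 1).foldl (fun ans dz =>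
          let t := tile.map (fun p => (p.1 + dx, p.2.1 + dy, p.2.2 + dz))
          if t.all (fun q => shape.contains q) then ans ++ [t] else ans) ans) ans) []

-- ===== PORT B =====
def all_shifts_alt (shape : List (Int × Int × Int)) (tile : List (Int × Int × Int)) : List (List (Int × Int × Int)) :=
  match pvBounds? shape, tile with
  | some (d0, d1, d2), (x0, y0, z0) :: _ =>
      let shifts := shape.filterMap (fun s =>
        let dx := s.1 - x0
        let dy := s.2.1 - y0
        let dz := s.2.2 - z0
        if 0 ≤ dx ∧ dx < d0 ∧ 0 ≤ dy ∧ dy < d1 ∧ 0 ≤ dz ∧ dz < d2 ∧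
           tile.all (fun p => shape.contains (p.1 + dx, p.2.1 + dy, p.2.2 + dz))
        then some (dx, dy, dz) else none)
      (PySem.List.sorted shifts
          (fun d => d.1 * 2 ^ 66 + d.2.1 * 2 ^ 33 + d.2.2) false).map
        (fun d => tile.map (fun p => (p.1 + d.1, p.2.1 + d.2.1, p.2.2 + d.2.2)))
  | _, _ => []   -- tile[0] / bounds(shape) raise here; excluded by Pre_

-- ===== PRECONDITION & SPEC =====
-- Pre_ excludes: shape = [] (Python A raises ValueError in max()); tile = [] (B raises
-- IndexError on tile[0] where A's one-empty-placement-per-bounding-box-cell answer is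
-- an accidental corner nobody would specify); and a shape list with duplicates, which
-- the set[...] type convention rules out anyway.
def Pre_all_shifts (shape : List (Int × Int × Int)) (tile : List (Int × Int × Int)) : Prop :=
  shape ≠ [] ∧ tile ≠ [] ∧ shape.Nodup
instance (shape : List (Int × Int × Int)) (tile : List (Int × Int × Int)) : Decidable (Pre_all_shifts shape tile) := by unfold Pre_all_shifts; infer_instance
def pvWitness_all_shifts : (List (Int × Int × Int)) × (List (Int × Int × Int)) :=
  ([(0, 0, 0), (1, 0, 0)], [(0, 0, 0)])
def Spec_all_shifts (shape : List (Int × Int × Int)) (tile : List (Int × Int × Int)) (out : List (List (Int × Int × Int))) : Prop := out = all_shifts_alt shape tile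
instance (shape : List (Int × Int × Int)) (tile : List (Int × Int × Int)) (out : List (List (Int × Int × Int))) : Decidable (Spec_all_shifts shape tile out) := by unfold Spec_all_shifts; infer_instance

-- ===== CLAIM (what is proved, stated in full; the proofs are below) =====
def Claim_equal_all_shifts : Prop := ∀ (shape : List (Int × Int × Int)) (tile : List (Int × Int × Int)), Dom_all_shifts shape tile → Pre_all_shifts shape tile → Spec_all_shifts shape tile (all_shifts shape tile)

-- ===== LEMMAS AND PROOFS =====

def pvApply (tile : List (Int × Int × Int)) (d : Int × Int × Int) : List (Int × Int × Int) :=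
  tile.map (fun p => (p.1 + d.1, p.2.1 + d.2.1, p.2.2 + d.2.2))

def pvFit (shape tile : List (Int × Int × Int)) (d : Int × Int × Int) : Bool :=
  (pvApply tile d).all (fun q => shape.contains q)

-- the accepted shifts, in A's (lexicographic) emission order
def pvLA (shape tile : List (Int × Int × Int)) (d0 d1 d2 : Int) : List (Int × Int × Int) :=
  (PySem.List.pyRange 0 d0 1).flatMap (fun dx =>
    (PySem.List.pyRange 0 d1 1).flatMap (fun dy =>
      ((PySem.List.pyRange 0 d2 1).filter (fun dz => pvFit shape tile (dx, dy, dz))).map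
        (fun dz => (dx, dy, dz))))

def pvKey (d : Int × Int × Int) : Int := d.1 * 2 ^ 66 + d.2.1 * 2 ^ 33 + d.2.2

lemma pvA_eq (shape tile : List (Int × Int × Int)) (d0 d1 d2 : Int)
    (h : pvBounds? shape = some (d0, d1, d2)) :
    all_shifts shape tile = (pvLA shape tile d0 d1 d2).map (pvApply tile) := by
  unfold all_shifts
  rw [h]
  simp only [PySem.List.foldl_append_if, PySem.List.foldl_append_eq_flatMap,
    pvLA, List.map_flatMap, List.map_map]
  simp [pvFit, pvApply, Function.comp_def]

lemma pv_mem_LA (shape tile : List (Int × Int × Int)) (d0 d1 d2 a b c : Int) :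
    (a, b, c) ∈ pvLA shape tile d0 d1 d2 ↔
      (0 ≤ a ∧ a < d0 ∧ 0 ≤ b ∧ b < d1 ∧ 0 ≤ c ∧ c < d2 ∧
        pvFit shape tile (a, b, c) = true) := by
  simp only [pvLA, List.mem_flatMap, List.mem_map, List.mem_filter,
    PySem.List.mem_pyRange_one]
  constructor
  · rintro ⟨dx, ⟨h1, h2⟩, dy, ⟨h3, h4⟩, dz, ⟨⟨h5, h6⟩, hf⟩, he⟩
    obtain ⟨rfl, rfl, rfl⟩ : dx = a ∧ dy = b ∧ dz = c := by
      simpa [Prod.ext_iff] using he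
    exact ⟨h1, h2, h3, h4, h5, h6, hf⟩
  · rintro ⟨h1, h2, h3, h4, h5, h6, hf⟩
    exact ⟨a, ⟨h1, h2⟩, b, ⟨h3, h4⟩, c, ⟨⟨h5, h6⟩, hf⟩, rfl⟩

lemma pvLA_pairwise_key (shape tile : List (Int × Int × Int)) (d0 d1 d2 : Int)
    (hb1 : d1 ≤ 2 ^ 33) (hb2 : d2 ≤ 2 ^ 33) :
    (pvLA shape tile d0 d1 d2).Pairwise (fun u v => pvKey u < pvKey v) := by
  have hlex : (pvLA shape tile d0 d1 d2).Pairwise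
      (fun u v => u.1 < v.1 ∨ (u.1 = v.1 ∧ (u.2.1 < v.2.1 ∨ (u.2.1 = v.2.1 ∧ u.2.2 < v.2.2)))) := by
    unfold pvLA
    rw [List.pairwise_flatMap]
    refine ⟨fun dx _ => ?_, ?_⟩
    · rw [List.pairwise_flatMap]
      refine ⟨fun dy _ => ?_, ?_⟩
      · refine List.Pairwise.map _ (fun z1 z2 h => ?_)
          ((PySem.List.pairwise_lt_pyRange_one _ _).filter _)
        exact Or.inr ⟨rfl, Or.inr ⟨rfl, h⟩⟩
      · refine (PySem.List.pairwise_lt_pyRange_one _ _).imp ?_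
        rintro y1 y2 h u hu v hv
        simp only [List.mem_map, List.mem_filter] at hu hv
        obtain ⟨z1, _, rfl⟩ := hu
        obtain ⟨z2, _, rfl⟩ := hv
        exact Or.inr ⟨rfl, Or.inl h⟩
    · refine (PySem.List.pairwise_lt_pyRange_one _ _).imp ?_
      rintro x1 x2 h u hu v hv
      simp only [List.mem_flatMap, List.mem_map, List.mem_filter] at hu hv
      obtain ⟨y1, _, z1, _, rfl⟩ := hu
      obtain ⟨y2, _, z2, _, rfl⟩ := hv
      exact Or.inl h
  refine hlex.imp_of_mem (fun {u} {v} hu hv h => ?_)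
  obtain ⟨a1, b1, c1⟩ := u
  obtain ⟨a2, b2, c2⟩ := v
  rw [pv_mem_LA] at hu hv
  simp only at h
  unfold pvKey
  simp only
  obtain ⟨u1, u2, u3, u4, u5, u6, -⟩ := hu
  obtain ⟨v1, v2, v3, v4, v5, v6, -⟩ := hv
  have e33 : (2 : Int) ^ 33 = 8589934592 := by norm_num
  have e66 : (2 : Int) ^ 66 = 73786976294838206464 := by norm_num
  rw [e33, e66] at *
  rcases h with h | ⟨rfl, h | ⟨rfl, h⟩⟩ <;> nlinarith

lemma pvB_eq (shape tile : List (Int × Int × Int)) (d0 d1 d2 : Int)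
    (x0 y0 z0 : Int) (rest : List (Int × Int × Int))
    (h : pvBounds? shape = some (d0, d1, d2))
    (ht : tile = (x0, y0, z0) :: rest)
    (hnd : shape.Nodup)
    (hb1 : d1 ≤ 2 ^ 33) (hb2 : d2 ≤ 2 ^ 33) :
    all_shifts_alt shape tile = (pvLA shape tile d0 d1 d2).map (pvApply tile) := by
  subst ht
  unfold all_shifts_alt
  rw [h]
  simp only
  -- name the filterMap
  set tile := ((x0, y0, z0) :: rest) with htile
  set f : (Int × Int × Int) → Option (Int × Int × Int) := (fun s =>
        if 0 ≤ s.1 - x0 ∧ s.1 - x0 < d0 ∧ 0 ≤ s.2.1 - y0 ∧ s.2.1 - y0 < d1 ∧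
           0 ≤ s.2.2 - z0 ∧ s.2.2 - z0 < d2 ∧
           tile.all (fun p => shape.contains (p.1 + (s.1 - x0), p.2.1 + (s.2.1 - y0), p.2.2 + (s.2.2 - z0)))
        then some (s.1 - x0, s.2.1 - y0, s.2.2 - z0) else none) with hf
  have hmemf : ∀ d : Int × Int × Int, d ∈ shape.filterMap f ↔ d ∈ pvLA shape tile d0 d1 d2 := by
    rintro ⟨a, b, c⟩
    rw [pv_mem_LA, List.mem_filterMap]
    constructor
    · rintro ⟨s, hs, hfs⟩
      rw [hf] at hfs
      simp only at hfs
      split at hfs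
      · rename_i hc
        obtain ⟨rfl, rfl, rfl⟩ : s.1 - x0 = a ∧ s.2.1 - y0 = b ∧ s.2.2 - z0 = c := by
          simpa [Prod.ext_iff] using hfs
        obtain ⟨c1, c2, c3, c4, c5, c6, c7⟩ := hc
        refine ⟨c1, c2, c3, c4, c5, c6, ?_⟩
        simp only [pvFit, pvApply, List.all_map, List.all_eq_true, Function.comp] at c7 ⊢
        exact c7
      · exact absurd hfs (by simp)
    · rintro ⟨h1, h2, h3, h4, h5, h6, hfit⟩
      refine ⟨(x0 + a, y0 + b, z0 + c), ?_, ?_⟩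
      · have hmem : (x0, y0, z0) ∈ tile := by simp [htile]
        have := hfit
        simp only [pvFit, pvApply, List.all_eq_true] at this
        have h0 := this _ (List.mem_map_of_mem hmem)
        simpa using h0
      · rw [hf]
        simp only
        have e1 : x0 + a - x0 = a := by ring
        have e2 : y0 + b - y0 = b := by ring
        have e3 : z0 + c - z0 = c := by ring
        rw [if_pos]
        · simp [e1, e2, e3]
        · refine ⟨by omega, by omega, by omega, by omega, by omega, by omega, ?_⟩
          simp only [e1, e2, e3]
          simp only [pvFit, pvApply, List.all_map, List.all_eq_true, Function.comp] at hfit ⊢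
          exact hfit
  have hndS : (shape.filterMap f).Nodup := by
    refine List.Nodup.filterMap ?_ hnd
    intro s s' b hb hb'
    rw [hf] at hb hb'
    simp only [Option.mem_def] at hb hb'
    split at hb
    · split at hb'
      · obtain ⟨e1, e2, e3⟩ : s.1 - x0 = b.1 ∧ s.2.1 - y0 = b.2.1 ∧ s.2.2 - z0 = b.2.2 := by
          simpa [Prod.ext_iff] using hb
        obtain ⟨e1', e2', e3'⟩ : s'.1 - x0 = b.1 ∧ s'.2.1 - y0 = b.2.1 ∧ s'.2.2 - z0 = b.2.2 := by
          simpa [Prod.ext_iff] using hb'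
        obtain ⟨sa, sb, sc⟩ := s
        obtain ⟨sa', sb', sc'⟩ := s'
        simp only [Prod.ext_iff]
        simp only at e1 e2 e3 e1' e2' e3'
        refine ⟨by omega, by omega, by omega⟩
      · exact absurd hb' (by simp)
    · exact absurd hb (by simp)
  have hpw := pvLA_pairwise_key shape tile d0 d1 d2 hb1 hb2
  have hndLA : (pvLA shape tile d0 d1 d2).Nodup :=
    hpw.imp (fun hlt => by intro e; rw [e] at hlt; exact absurd hlt (lt_irrefl _))
  have hperm : (pvLA shape tile d0 d1 d2).Perm (shape.filterMap f) :=
    (List.perm_ext_iff_of_nodup hndLA hndS).mpr (fun d => ((hmemf d).symm))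
  rw [PySem.List.sorted_eq_of_perm_of_pairwise_lt _ _ _ hperm (by exact hpw)]
  simp [pvApply]

lemma pv_bounds_some (shape : List (Int × Int × Int)) (hne : shape ≠ []) :
    ∃ d0 d1 d2, pvBounds? shape = some (d0, d1, d2) := by
  unfold pvBounds?
  have h1 : shape.map (fun p => p.1) ≠ [] := by simpa using hne
  have h2 : shape.map (fun p => p.2.1) ≠ [] := by simpa using hne
  have h3 : shape.map (fun p => p.2.2) ≠ [] := by simpa using hne
  rcases hm1 : PySem.List.max? (shape.map (fun p => p.1)) (fun v => v) with _ | a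
  · exact absurd ((PySem.List.max?_eq_none_iff _ _).mp hm1) h1
  rcases hm2 : PySem.List.max? (shape.map (fun p => p.2.1)) (fun v => v) with _ | b
  · exact absurd ((PySem.List.max?_eq_none_iff _ _).mp hm2) h2
  rcases hm3 : PySem.List.max? (shape.map (fun p => p.2.2)) (fun v => v) with _ | c
  · exact absurd ((PySem.List.max?_eq_none_iff _ _).mp hm3) h3
  exact ⟨a + 1, b + 1, c + 1, by rw [hm1, hm2, hm3]⟩

lemma pv_bounds_le (shape : List (Int × Int × Int)) (d0 d1 d2 : Int)
    (hdom : shape.all (fun p => pvDomInt p.1 && (pvDomInt p.2.1 && pvDomInt p.2.2)) = true)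
    (h : pvBounds? shape = some (d0, d1, d2)) :
    d0 ≤ 2 ^ 33 ∧ d1 ≤ 2 ^ 33 ∧ d2 ≤ 2 ^ 33 := by
  unfold pvBounds? at h
  rcases hm1 : PySem.List.max? (shape.map (fun p => p.1)) (fun v => v) with _ | a <;> rw [hm1] at h
  · simp at h
  rcases hm2 : PySem.List.max? (shape.map (fun p => p.2.1)) (fun v => v) with _ | b <;> rw [hm2] at h
  · simp at h
  rcases hm3 : PySem.List.max? (shape.map (fun p => p.2.2)) (fun v => v) with _ | c <;> rw [hm3] at h
  · simp at h
  obtain ⟨rfl, rfl, rfl⟩ : a + 1 = d0 ∧ b + 1 = d1 ∧ c + 1 = d2 := by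
    simpa [Prod.ext_iff] using h
  simp only [List.all_eq_true] at hdom
  have g1 := PySem.List.max?_mem hm1
  have g2 := PySem.List.max?_mem hm2
  have g3 := PySem.List.max?_mem hm3
  simp only [List.mem_map] at g1 g2 g3
  obtain ⟨p1, hp1, rfl⟩ := g1
  obtain ⟨p2, hp2, rfl⟩ := g2
  obtain ⟨p3, hp3, rfl⟩ := g3
  have d1' := hdom p1 hp1
  have d2' := hdom p2 hp2
  have d3' := hdom p3 hp3
  simp only [pvDomInt, Bool.and_eq_true, decide_eq_true_eq] at d1' d2' d3'
  refine ⟨by norm_num; omega, by norm_num; omega, by norm_num; omega⟩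

-- ===== VERDICT (by name: the statement is the Claim_ definition above) =====
theorem all_shifts_spec : Claim_equal_all_shifts := by
  intro shape tile hdom hpre
  obtain ⟨hs, ht, hnd⟩ := hpre
  obtain ⟨d0, d1, d2, hb⟩ := pv_bounds_some shape hs
  have hdom' : shape.all (fun p => pvDomInt p.1 && (pvDomInt p.2.1 && pvDomInt p.2.2)) = true := by
    unfold Dom_all_shifts at hdom
    simpa using (Bool.and_eq_true_iff.mp hdom).1
  obtain ⟨-, hb1, hb2⟩ := pv_bounds_le shape d0 d1 d2 hdom' hb
  obtain ⟨⟨x0, y0, z0⟩, rest, rfl⟩ : ∃ p rest, tile = p :: rest := by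
    cases tile with
    | nil => exact absurd rfl ht
    | cons p rest => exact ⟨p, rest, rfl⟩
  unfold Spec_all_shifts
  rw [pvA_eq shape _ d0 d1 d2 hb,
    pvB_eq shape _ d0 d1 d2 x0 y0 z0 rest hb rfl hnd hb1 hb2]
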